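-- pv_equiv track=rewrite | github.com/dylaneck/Nim-Player | nim_player.py | calculate_binary
-- ===== SOURCE A (Python) =====
-- def calculate_binary(nim_board):
--     # Creates list of binary digits for each possible value in the nim board
--     bin_list = []
--     for row in nim_board:
--         if row == 0:
--             bin_list.append([0, 0, 0])
--         elif row == 1:
--             bin_list.append([0, 0, 1])
--         elif row == 2:
--             bin_list.append([0, 1, 0])
--         elif row == 3:
--             bin_list.append([0, 1, 1])
--         elif row == 4:
--             bin_list.append([1, 0, 0])
--         elif row == 5:
--             bin_list.append([1, 0, 1])
--         elif row == 6:
--             bin_list.append([1, 1, 0])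
--         elif row == 7:
--             bin_list.append([1, 1, 1])
--
--     return bin_list
-- ===== SOURCE B (Python) =====
-- def calculate_binary(nim_board):
--     # Bit arithmetic instead of an eight-way if-chain; values outside 0..7 are dropped.
--     return [[row >> 2 & 1, row >> 1 & 1, row & 1]
--             for row in nim_board if 0 <= row <= 7]
-- ===== Notes on version B (the rewrite author's own statement) =====
-- stated objective: idiomatic
-- what changed: Replaces the eight-branch if/elif chain with a single comprehension that extracts the three bits arithmetically (shift/mask) and filters out-of-range rows.
import Mathlib
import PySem

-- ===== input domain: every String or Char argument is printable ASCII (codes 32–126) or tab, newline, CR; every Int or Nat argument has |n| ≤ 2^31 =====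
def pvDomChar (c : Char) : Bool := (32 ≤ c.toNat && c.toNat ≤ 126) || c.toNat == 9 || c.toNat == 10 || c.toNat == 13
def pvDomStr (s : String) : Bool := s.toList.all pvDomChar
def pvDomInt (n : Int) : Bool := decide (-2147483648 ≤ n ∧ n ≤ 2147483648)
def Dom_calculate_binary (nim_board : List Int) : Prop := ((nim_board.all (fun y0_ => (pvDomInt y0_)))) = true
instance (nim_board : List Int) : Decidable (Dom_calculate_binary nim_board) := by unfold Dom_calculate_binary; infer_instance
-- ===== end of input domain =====

-- B replaces A's eight-way if/elif chain by a comprehension extracting the three bits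
-- arithmetically (shift/mask), filtering out-of-range rows; objective: idiomatic.

-- ===== PORT A =====
-- the body of A's loop: appends the matching 3-bit list, or nothing
def calcBinStep (bin_list : List (List Int)) (row : Int) : List (List Int) :=
  if row = 0 then bin_list ++ [[0, 0, 0]]
  else if row = 1 then bin_list ++ [[0, 0, 1]]
  else if row = 2 then bin_list ++ [[0, 1, 0]]
  else if row = 3 then bin_list ++ [[0, 1, 1]]
  else if row = 4 then bin_list ++ [[1, 0, 0]]
  else if row = 5 then bin_list ++ [[1, 0, 1]]
  else if row = 6 then bin_list ++ [[1, 1, 0]]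
  else if row = 7 then bin_list ++ [[1, 1, 1]]
  else bin_list

def calculate_binary (nim_board : List Int) : List (List Int) :=
  nim_board.foldl calcBinStep []

-- ===== PORT B =====
-- Python `row >> k & 1` on ints: arithmetic shift = floor-division by 2^k, then mod 2;
-- PySem.Int.floordiv/mod are exact for Python's // and & 1 (mod 2, both nonneg here).
def calculate_binary_alt (nim_board : List Int) : List (List Int) :=
  nim_board.filterMap (fun row =>
    if 0 ≤ row ∧ row ≤ 7 then
      some [PySem.Int.mod (PySem.Int.floordiv row 4) 2,
            PySem.Int.mod (PySem.Int.floordiv row 2) 2,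
            PySem.Int.mod row 2]
    else none)

-- ===== PRECONDITION & SPEC =====
def Spec_calculate_binary (nim_board : List Int) (out : List (List Int)) : Prop := out = calculate_binary_alt nim_board
instance (nim_board : List Int) (out : List (List Int)) : Decidable (Spec_calculate_binary nim_board out) := by unfold Spec_calculate_binary; infer_instance

-- ===== CLAIM (what is proved, stated in full; the proofs are below) =====
def Claim_equal_calculate_binary : Prop := ∀ (nim_board : List Int), Dom_calculate_binary nim_board → Spec_calculate_binary nim_board (calculate_binary nim_board)

-- ===== LEMMAS AND PROOFS =====

-- one step of A equals appending B's per-row result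
lemma calcBinStep_eq (acc : List (List Int)) (row : Int) :
    calcBinStep acc row =
      acc ++ (calculate_binary_alt [row]) := by
  unfold calcBinStep calculate_binary_alt
  split_ifs with h0 h1 h2 h3 h4 h5 h6 h7
  · subst h0; congr 1
  · subst h1; congr 1
  · subst h2; congr 1
  · subst h3; congr 1
  · subst h4; congr 1
  · subst h5; congr 1
  · subst h6; congr 1
  · subst h7; congr 1
  · simp only [List.filterMap]
    rw [if_neg (by omega)]
    simp

lemma foldl_calcBinStep (l : List Int) (acc : List (List Int)) :
    l.foldl calcBinStep acc = acc ++ calculate_binary_alt l := by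
  induction l generalizing acc with
  | nil => simp [calculate_binary_alt]
  | cons x xs ih =>
      simp only [List.foldl_cons, calcBinStep_eq]
      rw [ih]
      unfold calculate_binary_alt
      rw [show x :: xs = [x] ++ xs from rfl, List.filterMap_append, List.append_assoc]

-- ===== VERDICT (by name: the statement is the Claim_ definition above) =====
theorem calculate_binary_spec : Claim_equal_calculate_binary := by
  intro nb _
  unfold Spec_calculate_binary calculate_binary
  rw [foldl_calcBinStep]
  simp
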